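-- pv_equiv track=rewrite | github.com/iLearn-Lab/EvoHarness | src/evo_harness/harness/evolution_bridge.py | _best_summary
-- ===== SOURCE A (Python) =====
-- from typing import Any
--
-- def _best_summary(messages: list[dict[str, Any]], active_command: dict[str, Any]) -> str:
--     for role in ("assistant", "user"):
--         for message in reversed(messages):
--             if message.get("role") == role and str(message.get("text", "")).strip():
--                 return str(message["text"]).strip()[:240]
--     command_name = active_command.get("name")
--     if command_name:
--         return f"Session executed under command {command_name}."
--     return "Session completed without a detailed summary."
-- ===== SOURCE B (Python) =====
-- def _best_summary(messages, active_command):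
--     assistant_text = None
--     user_text = None
--     for message in reversed(messages):
--         text = str(message.get("text", "")).strip()
--         if not text:
--             continue
--         role = message.get("role")
--         if role == "assistant":
--             assistant_text = text[:240]
--             break
--         if role == "user" and user_text is None:
--             user_text = text[:240]
--     if assistant_text is not None:
--         return assistant_text
--     if user_text is not None:
--         return user_text
--     command_name = active_command.get("name")
--     if command_name:
--         return f"Session executed under command {command_name}."
--     return "Session completed without a detailed summary."
-- ===== Notes on version B (the rewrite author's own statement) =====
-- stated objective: simpler
-- what changed: Replaces A's two full reversed scans (one per role) by a single reversed pass that tracks an assistant candidate and a user candidate, breaking as soon as an assistant message is found.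
import Mathlib
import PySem

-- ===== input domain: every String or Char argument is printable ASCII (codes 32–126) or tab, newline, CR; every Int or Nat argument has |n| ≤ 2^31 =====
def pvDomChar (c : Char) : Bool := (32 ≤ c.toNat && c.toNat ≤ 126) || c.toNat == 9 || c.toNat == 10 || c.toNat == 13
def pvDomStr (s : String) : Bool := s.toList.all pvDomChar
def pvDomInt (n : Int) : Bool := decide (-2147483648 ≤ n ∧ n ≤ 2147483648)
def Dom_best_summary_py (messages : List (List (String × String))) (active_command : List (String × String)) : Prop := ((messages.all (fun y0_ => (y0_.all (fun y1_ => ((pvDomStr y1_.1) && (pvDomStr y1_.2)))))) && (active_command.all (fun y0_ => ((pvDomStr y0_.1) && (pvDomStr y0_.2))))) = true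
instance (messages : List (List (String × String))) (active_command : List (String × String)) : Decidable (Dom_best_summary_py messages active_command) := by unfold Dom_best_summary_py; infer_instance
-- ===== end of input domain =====

-- B replaces A's two reversed scans (one per role) by a single reversed pass keeping an
-- assistant and a user candidate; same return value, objective: simpler.

-- ===== PORT A =====
-- the inner 'for message in reversed(messages)' loop of A for one role, with its early return.
-- 'str(message["text"])' in A's return is ported as '(get? m "text").getD ""': the guard
-- 'str(message.get("text","")).strip()' ensures the key is present there, so this is exact.
def pvScanRole (role : String) : List (List (String × String)) → Option String
  | [] => none
  | m :: rest =>
    if (PySem.Dict.get? (PySem.Dict.mk m) "role" == some role)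
        && !(PySem.Str.strip (PySem.Dict.getD (PySem.Dict.mk m) "text" "") == "") then
      some (PySem.Str.slice (PySem.Str.strip ((PySem.Dict.get? (PySem.Dict.mk m) "text").getD "")) none (some 240))
    else pvScanRole role rest

def best_summary_py (messages : List (List (String × String))) (active_command : List (String × String)) : String :=
  match pvScanRole "assistant" messages.reverse with
  | some t => t
  | none =>
    match pvScanRole "user" messages.reverse with
    | some t => t
    | none =>
      match PySem.Dict.get? (PySem.Dict.mk active_command) "name" with
      | some name =>
        if name == "" then "Session completed without a detailed summary."
        else "Session executed under command " ++ name ++ "."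
      | none => "Session completed without a detailed summary."

-- ===== PORT B =====
-- B's single loop over reversed(messages): first component = assistant candidate (break on hit),
-- second = first non-empty user text seen (the 'user_text is None' guard).
def pvLoopB : List (List (String × String)) → Option String → Option String × Option String
  | [], user_text => (none, user_text)
  | m :: rest, user_text =>
    let text := PySem.Str.strip (PySem.Dict.getD (PySem.Dict.mk m) "text" "")
    if text == "" then pvLoopB rest user_text
    else if PySem.Dict.get? (PySem.Dict.mk m) "role" == some "assistant" then
      (some (PySem.Str.slice text none (some 240)), user_text)
    else if (PySem.Dict.get? (PySem.Dict.mk m) "role" == some "user") && user_text.isNone then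
      pvLoopB rest (some (PySem.Str.slice text none (some 240)))
    else pvLoopB rest user_text

def best_summary_py_alt (messages : List (List (String × String))) (active_command : List (String × String)) : String :=
  match pvLoopB messages.reverse none with
  | (some a, _) => a
  | (none, some u) => u
  | (none, none) =>
    match PySem.Dict.get? (PySem.Dict.mk active_command) "name" with
    | some name =>
      if name == "" then "Session completed without a detailed summary."
      else "Session executed under command " ++ name ++ "."
    | none => "Session completed without a detailed summary."

-- ===== PRECONDITION & SPEC =====
def Spec_best_summary_py (messages : List (List (String × String))) (active_command : List (String × String)) (out : String) : Prop := out = best_summary_py_alt messages active_command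
instance (messages : List (List (String × String))) (active_command : List (String × String)) (out : String) : Decidable (Spec_best_summary_py messages active_command out) := by unfold Spec_best_summary_py; infer_instance

-- ===== CLAIM (what is proved, stated in full; the proofs are below) =====
def Claim_equal_best_summary_py : Prop := ∀ (messages : List (List (String × String))) (active_command : List (String × String)), Dom_best_summary_py messages active_command → Spec_best_summary_py messages active_command (best_summary_py messages active_command)

-- ===== LEMMAS AND PROOFS =====

-- The one loop of B computes what A's two scans compute, for any pending user candidate u.
theorem pvLoopB_eq_scans (l : List (List (String × String))) : ∀ (u : Option String) (fb : String),
    (match pvLoopB l u with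
     | (some a, _) => a
     | (none, some t) => t
     | (none, none) => fb)
    =
    (match pvScanRole "assistant" l with
     | some a => a
     | none =>
       match u.or (pvScanRole "user" l) with
       | some t => t
       | none => fb) := by
  induction l with
  | nil => intro u fb; cases u <;> simp [pvLoopB, pvScanRole]
  | cons m rest ih =>
    intro u fb
    have hgd : PySem.Dict.getD (PySem.Dict.mk m) "text" ""
        = (PySem.Dict.get? (PySem.Dict.mk m) "text").getD "" :=
      PySem.Dict.getD_eq_get?_getD (PySem.Dict.mk m) "text" ""
    simp only [pvLoopB, pvScanRole, hgd]
    by_cases h1 : PySem.Str.strip ((PySem.Dict.get? (PySem.Dict.mk m) "text").getD "") = ""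
    · simp only [h1, beq_self_eq_true, if_true, Bool.not_true, Bool.and_false]
      exact ih u fb
    · by_cases h2 : PySem.Dict.get? (PySem.Dict.mk m) "role" = some "assistant"
      · simp [h1, h2]
      · by_cases h3 : PySem.Dict.get? (PySem.Dict.mk m) "role" = some "user"
        · cases u with
          | none => simp [h1, h3, ih]
          | some t0 => simp [h1, h3, ih]
        · simp [h1, h2, h3]
          exact ih u fb

-- ===== VERDICT (by name: the statement is the Claim_ definition above) =====
theorem best_summary_py_spec : Claim_equal_best_summary_py := by
  intro messages active_command _
  unfold Spec_best_summary_py best_summary_py best_summary_py_alt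
  rw [pvLoopB_eq_scans]
  simp
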